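-- pv_equiv track=rewrite | github.com/supracharger/Data-Structures-Algorithms | Algos_on_Strings/trie_matching.py | solve
-- ===== SOURCE A (Python) =====
-- class Node:
-- 	def __init__ (self, idx):
-- 		self._idx = idx
-- 		# self.next = [NA] * 4
--
-- 	def __repr__(self):
-- 		return 'Node_' + str(self._idx)
--
-- def solve (text, n, patterns):
-- 	result = []
-- 	trie = ConstructTrie(patterns)
-- 	for k in range(len(text)):
-- 		foundIx = PrefixTireMatching(text[k:], trie)
-- 		if not foundIx: continue				# Did not find substring
-- 		result.append(k)
-- 	return result
--
-- def PrefixTireMatching(text, trie):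
-- 	v = trie[0]
-- 	for i,sym in enumerate(text):
-- 		try:
-- 			nd = v[sym]
-- 			branch = trie[nd._idx]
-- 		except KeyError: return False
-- 		if len(branch) == 0: 		# is leaf node
-- 			return True
-- 		else:						# is Edge
-- 			v = branch
-- 	return False
--
-- def ConstructTrie(patterns):
-- 	root = [{}]
-- 	for pat in patterns:
-- 		node = root[0]
-- 		for c in pat:
-- 			if c in node:
-- 				ix = node[c]._idx
-- 				node = root[ix]
-- 			else:
-- 				node[c] = Node(len(root))
-- 				node = { }
-- 				root.append(node)
-- 	return root
-- ===== SOURCE B (Python) =====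
-- def solve(text, n, patterns):
--     # Only patterns that no other pattern strictly extends can ever be reported by
--     # the trie's leaf-only matching; a pattern is such a "maximal" pattern exactly
--     # when it is not a proper prefix of any pattern.  Collect them in a hash set and
--     # probe the text at each position with one slice per distinct pattern length.
--     proper = {q[:d] for q in patterns for d in range(len(q))}
--     maximal = {p for p in patterns if p and p not in proper}
--     lens = {len(p) for p in maximal}
--     return [k for k in range(len(text))
--             if any(text[k:k + d] in maximal for d in lens)]
-- ===== Notes on version B (the rewrite author's own statement) =====
-- stated objective: faster
-- what changed: B drops the trie entirely: it characterises A's leaf-only trie matching as 'some pattern that no other pattern strictly extends is a prefix here', precomputes hash sets of proper prefixes, maximal patterns and their lengths, and probes each text position with one short slice lookup per distinct maximal-pattern length instead of building a node array and walking it on a fresh whole-tail slice text[k:] per position.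
import Mathlib
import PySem

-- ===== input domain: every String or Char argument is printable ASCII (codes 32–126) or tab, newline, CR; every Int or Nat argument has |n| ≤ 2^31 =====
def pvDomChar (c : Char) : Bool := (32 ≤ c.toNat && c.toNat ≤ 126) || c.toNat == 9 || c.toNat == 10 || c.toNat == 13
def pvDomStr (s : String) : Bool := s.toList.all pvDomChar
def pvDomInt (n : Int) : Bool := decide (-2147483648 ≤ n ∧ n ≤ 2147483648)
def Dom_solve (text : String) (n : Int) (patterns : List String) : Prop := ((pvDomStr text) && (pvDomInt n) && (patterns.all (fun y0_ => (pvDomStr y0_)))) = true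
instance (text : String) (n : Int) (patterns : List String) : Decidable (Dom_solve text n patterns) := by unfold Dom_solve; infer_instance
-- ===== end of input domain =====

-- B replaces A's trie (node array built by ConstructTrie, walked on a fresh slice text[k:]
-- per position) by hash sets: the "maximal" patterns (those no other pattern strictly
-- extends -- the only ones A's leaf-only walk can ever report) and their lengths, probing
-- each position with one short slice per distinct maximal-pattern length.


-- ===== PORT A =====
-- A Node object carries only its index `_idx` (a nonnegative list position), so a trie
-- node's children dict is `Dict Char Nat`.  Python's `trie[idx]` / `root[ix]` always has
-- idx in range by construction; `List.getD … Dict.empty` is exact there.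
def trieNode (t : List (PySem.Dict Char Nat)) (ix : Nat) : PySem.Dict Char Nat :=
  t.getD ix PySem.Dict.empty

-- body of ConstructTrie's inner loop: `node` is root[ix] (Python mutates it in place;
-- `node[c] = Node(len(root))` is the set at ix, `root.append({})` the append)
def trieStep (st : List (PySem.Dict Char Nat) × Nat) (c : Char) : List (PySem.Dict Char Nat) × Nat :=
  match (trieNode st.1 st.2).get? c with
  | some j => (st.1, j)
  | none =>
      (st.1.set st.2 ((trieNode st.1 st.2).insert c st.1.length) ++ [PySem.Dict.empty],
       st.1.length)

def ConstructTrie (patterns : List String) : List (PySem.Dict Char Nat) :=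
  patterns.foldl (fun root pat => (pat.toList.foldl trieStep (root, 0)).1) [PySem.Dict.empty]

-- the `for i,sym in enumerate(text)` walk; `len(branch) == 0` is `items.isEmpty`
def PrefixTireMatching (t : List (PySem.Dict Char Nat)) : Nat → List Char → Bool
  | _, [] => false
  | v, c :: rest =>
    match (trieNode t v).get? c with
    | none => false
    | some j => if (trieNode t j).items.isEmpty then true else PrefixTireMatching t j rest

-- `text[k:]` for 0 ≤ k < len(text) is `drop k` (PySem.List.slice_from_natCast)
def solve (text : String) (n : Int) (patterns : List String) : List Int :=
  let trie := ConstructTrie patterns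
  (List.range text.toList.length).foldl
    (fun result k =>
      if PrefixTireMatching trie 0 (text.toList.drop k) then result ++ [(k : Int)]
      else result)
    []

-- ===== PORT B =====
-- str values are represented as List Char throughout (the convention's list side);
-- `q[:d]` is `take d`, `p and p not in proper` is the filter condition,
-- `text[k:k+d]` is PySem.List.slice (k ≥ 0 here), set comprehensions are Set.ofList
def properSet (patterns : List String) : PySem.Set (List Char) :=
  PySem.Set.ofList
    (patterns.flatMap (fun q => (List.range q.toList.length).map (fun d => q.toList.take d)))

def maximalSet (patterns : List String) : PySem.Set (List Char) :=
  PySem.Set.ofList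
    ((patterns.filter (fun p =>
        !p.toList.isEmpty && !(PySem.Set.contains (properSet patterns) p.toList))).map
      String.toList)

def lenSet (patterns : List String) : PySem.Set Int :=
  PySem.Set.ofList ((maximalSet patterns).map (fun w => (w.length : Int)))

-- the guarded list comprehension over range(len(text)) is filter-then-map
def solve_alt (text : String) (n : Int) (patterns : List String) : List Int :=
  ((List.range text.toList.length).filter
      (fun (k : Nat) => (lenSet patterns).any (fun d =>
        PySem.Set.contains (maximalSet patterns)
          (PySem.List.slice text.toList (some (k : Int)) (some ((k : Int) + d)))))).map
    (fun (k : Nat) => (k : Int))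

-- ===== PRECONDITION & SPEC =====
def Spec_solve (text : String) (n : Int) (patterns : List String) (out : List Int) : Prop := out = solve_alt text n patterns
instance (text : String) (n : Int) (patterns : List String) (out : List Int) : Decidable (Spec_solve text n patterns out) := by unfold Spec_solve; infer_instance

-- ===== CLAIM (what is proved, stated in full; the proofs are below) =====
def Claim_equal_solve : Prop := ∀ (text : String) (n : Int) (patterns : List String), Dom_solve text n patterns → Spec_solve text n patterns (solve text n patterns)

-- ===== LEMMAS AND PROOFS =====

def follow (t : List (PySem.Dict Char Nat)) : Nat → List Char → Option Nat
  | j, [] => some j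
  | j, c :: cs =>
    match (trieNode t j).get? c with
    | none => none
    | some j' => follow t j' cs

def TrieInv (t : List (PySem.Dict Char Nat)) (S : List Char → Prop) : Prop :=
  (∀ q : List Char, q ≠ [] → ((follow t 0 q).isSome ↔ S q)) ∧
  (∀ q q' : List Char, ∀ j, follow t 0 q = some j → follow t 0 q' = some j → q = q') ∧
  (∀ q : List Char, ∀ j, follow t 0 q = some j → j < t.length)

lemma follow_append (t : List (PySem.Dict Char Nat)) (q r : List Char) (j : Nat) :
    follow t j (q ++ r) = (follow t j q).bind (fun j' => follow t j' r) := by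
  induction q generalizing j with
  | nil => simp [follow]
  | cons c q ih =>
    simp only [List.cons_append, follow]
    cases (trieNode t j).get? c with
    | none => rfl
    | some j' => exact ih j'

lemma follow_prefix_isSome (t : List (PySem.Dict Char Nat)) (q r : List Char)
    (h : (follow t 0 (q ++ r)).isSome) : (follow t 0 q).isSome := by
  rw [follow_append] at h
  cases hq : follow t 0 q with
  | none => rw [hq] at h; simp at h
  | some j => simp

lemma trieNode_update (t : List (PySem.Dict Char Nat)) (ix : Nat) (d : PySem.Dict Char Nat)
    (hix : ix < t.length) (j : Nat) :
    trieNode (t.set ix d ++ [PySem.Dict.empty]) j = if j = ix then d else trieNode t j := by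
  unfold trieNode
  rcases eq_or_ne j ix with rfl | hne
  · simp [List.getD_eq_getElem?_getD, List.getElem?_append_left, List.length_set, hix]
  · simp only [if_neg hne, List.getD_eq_getElem?_getD]
    rcases lt_trichotomy j t.length with hj | hj | hj
    · rw [List.getElem?_append_left (by simpa using hj), List.getElem?_set_ne (by omega)]
    · subst hj
      rw [List.getElem?_append_right (le_of_eq (by simp))]; simp
    · rw [List.getElem?_eq_none (by simp; omega), List.getElem?_eq_none (by omega)]

lemma trieNode_length (t : List (PySem.Dict Char Nat)) : trieNode t t.length = PySem.Dict.empty := by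
  simp [trieNode, List.getD_eq_getElem?_getD]

lemma follow_update (t : List (PySem.Dict Char Nat)) (S : List Char → Prop)
    (u : List Char) (ix : Nat) (c : Char)
    (hinv : TrieInv t S) (hu : follow t 0 u = some ix) (hc : (trieNode t ix).get? c = none)
    (r : List Char) : ∀ (q0 : List Char) (j : Nat), follow t 0 q0 = some j →
    follow (t.set ix ((trieNode t ix).insert c t.length) ++ [PySem.Dict.empty]) j r =
      if (u ++ [c]) <+: (q0 ++ r) then
        (if q0 ++ r = u ++ [c] then some t.length else none)
      else follow t j r := by
  obtain ⟨hmem, hinj, hrange⟩ := hinv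
  have hixlt : ix < t.length := hrange u ix hu
  have hnotreach : follow t 0 (u ++ [c]) = none := by
    rw [follow_append, hu]; simp [follow, hc]
  have hnopre : ∀ (q0 : List Char) (j : Nat), follow t 0 q0 = some j → ¬ (u ++ [c] <+: q0) := by
    intro q0 j hq0 ⟨w, hw⟩
    have h1 : (follow t 0 ((u ++ [c]) ++ w)).isSome := by rw [hw, hq0]; simp
    have h2 := follow_prefix_isSome t (u ++ [c]) w h1
    rw [hnotreach] at h2; simp at h2
  induction r with
  | nil =>
    intro q0 j hq0
    simp only [List.append_nil, follow]
    rw [if_neg (hnopre q0 j hq0)]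
  | cons c₁ r' ih =>
    intro q0 j hq0
    have hnode := trieNode_update t ix ((trieNode t ix).insert c t.length) hixlt
    simp only [follow]
    rw [hnode]
    by_cases hj : j = ix
    · subst hj
      have hq0u : q0 = u := hinj q0 u j hq0 hu
      subst hq0u
      rw [if_pos rfl]
      by_cases hcc : c₁ = c
      · subst hcc
        rw [PySem.Dict.get?_insert_self]
        dsimp only
        have hcond : q0 ++ [c₁] <+: q0 ++ c₁ :: r' := ⟨r', by simp⟩
        rw [if_pos hcond]
        cases r' with
        | nil =>
          simp only [follow]
          rw [if_pos (by simp)]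
        | cons c₂ r'' =>
          have hne : q0 ++ c₁ :: c₂ :: r'' ≠ q0 ++ [c₁] := by
            intro h; apply_fun List.length at h; simp at h
          rw [if_neg hne]
          simp only [follow]
          rw [trieNode_update t j _ hixlt, if_neg (by omega), trieNode_length,
            PySem.Dict.get?_empty]
      · rw [PySem.Dict.get?_insert_of_ne _ _ hcc]
        have hncond : ¬ (q0 ++ [c] <+: q0 ++ c₁ :: r') := by
          intro ⟨w, hw⟩
          rw [List.append_assoc] at hw
          have h2 := List.append_cancel_left hw
          have h3 : c = c₁ := by simpa using congrArg (fun l => l.head?) h2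
          exact hcc h3.symm
        rw [if_neg hncond]
        cases hgd : (trieNode t j).get? c₁ with
        | none => rfl
        | some j₂ =>
          dsimp only
          have hq2 : follow t 0 (q0 ++ [c₁]) = some j₂ := by
            rw [follow_append, hq0]; simp [follow, hgd]
          have := ih (q0 ++ [c₁]) j₂ hq2
          rw [this, if_neg (by simpa using hncond)]
    · rw [if_neg hj]
      cases hgd : (trieNode t j).get? c₁ with
      | none =>
        have hncond : ¬ (u ++ [c] <+: q0 ++ c₁ :: r') := by
          intro hC
          by_cases hlen : u.length + 1 ≤ q0.length
          · exact hnopre q0 j hq0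
              (List.prefix_of_prefix_length_le hC (q0.prefix_append _) (by simp; omega))
          · have h2 : q0 ++ [c₁] <+: q0 ++ c₁ :: r' := ⟨r', by simp⟩
            have h3 : q0 ++ [c₁] <+: u ++ [c] :=
              List.prefix_of_prefix_length_le h2 hC (by simp; omega)
            rcases eq_or_lt_of_le (by omega : q0.length ≤ u.length) with heq | hlt
            · have heq2 : q0 ++ [c₁] = u ++ [c] := h3.eq_of_length (by simp [heq])
              have hq0eq : q0 = u := (List.append_inj' heq2 (by simp)).1
              have h' := hq0eq ▸ hq0
              rw [hu] at h'
              exact hj (Option.some_injective _ h'.symm)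
            · have h4 : q0 ++ [c₁] <+: u :=
                List.prefix_of_prefix_length_le h3 (u.prefix_append [c]) (by simp; omega)
              obtain ⟨w, hw⟩ := h4
              have h5 : (follow t 0 ((q0 ++ [c₁]) ++ w)).isSome := by rw [hw, hu]; simp
              have h6 := follow_prefix_isSome t (q0 ++ [c₁]) w h5
              rw [follow_append, hq0] at h6
              simp [follow, hgd] at h6
        rw [if_neg hncond]
      | some j₂ =>
        dsimp only
        have hq2 : follow t 0 (q0 ++ [c₁]) = some j₂ := by
          rw [follow_append, hq0]; simp [follow, hgd]
        have := ih (q0 ++ [c₁]) j₂ hq2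
        rw [this]
        simp only [List.append_assoc, List.cons_append, List.nil_append]

lemma trieStep_inv (t : List (PySem.Dict Char Nat)) (S : List Char → Prop)
    (u : List Char) (ix : Nat) (c : Char)
    (hinv : TrieInv t S) (hu : follow t 0 u = some ix) :
    TrieInv (trieStep (t, ix) c).1 (fun q => S q ∨ q = u ++ [c]) ∧
      follow (trieStep (t, ix) c).1 0 (u ++ [c]) = some (trieStep (t, ix) c).2 := by
  obtain ⟨hmem, hinj, hrange⟩ := hinv
  cases hc : (trieNode t ix).get? c with
  | some j =>
    simp only [trieStep, hc]
    have hsucc : follow t 0 (u ++ [c]) = some j := by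
      rw [follow_append, hu]; simp [follow, hc]
    refine ⟨⟨?_, hinj, hrange⟩, hsucc⟩
    intro q hq
    constructor
    · intro h; exact Or.inl ((hmem q hq).mp h)
    · rintro (h | rfl)
      · exact (hmem q hq).mpr h
      · rw [hsucc]; simp
  | none =>
    simp only [trieStep, hc]
    have hkey : ∀ r : List Char,
        follow (t.set ix ((trieNode t ix).insert c t.length) ++ [PySem.Dict.empty]) 0 r =
          if (u ++ [c]) <+: r then (if r = u ++ [c] then some t.length else none)
          else follow t 0 r := by
      intro r
      have := follow_update t S u ix c ⟨hmem, hinj, hrange⟩ hu hc r [] 0 rfl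
      simpa using this
    have hnotreach : follow t 0 (u ++ [c]) = none := by
      rw [follow_append, hu]; simp [follow, hc]
    have hnone : ∀ q : List Char, (u ++ [c]) <+: q → follow t 0 q = none := by
      intro q ⟨w, hw⟩
      rw [← hw, follow_append, hnotreach]; rfl
    have hlen : (t.set ix ((trieNode t ix).insert c t.length) ++ [PySem.Dict.empty]).length
        = t.length + 1 := by simp
    have hm : follow (t.set ix ((trieNode t ix).insert c t.length) ++ [PySem.Dict.empty]) 0
        (u ++ [c]) = some t.length := by
      rw [hkey, if_pos (List.prefix_refl _), if_pos rfl]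
    refine ⟨⟨?_, ?_, ?_⟩, hm⟩
    · intro q hq
      rw [hkey q]
      by_cases h1 : (u ++ [c]) <+: q
      · rw [if_pos h1]
        by_cases h2 : q = u ++ [c]
        · simp [h2]
        · rw [if_neg h2]
          simp only [Option.isSome_none, Bool.false_eq_true, false_iff]
          rintro (hS | rfl)
          · have := (hmem q hq).mpr hS
            rw [hnone q h1] at this; simp at this
          · exact h2 rfl
      · rw [if_neg h1]
        rw [hmem q hq]
        constructor
        · exact Or.inl
        · rintro (h | rfl)
          · exact h
          · exact absurd (List.prefix_refl _) h1
    · intro q q' j hq hq'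
      rw [hkey] at hq hq'
      by_cases b1 : (u ++ [c]) <+: q
      · rw [if_pos b1] at hq
        by_cases b2 : q = u ++ [c]
        · rw [if_pos b2] at hq
          by_cases b3 : (u ++ [c]) <+: q'
          · rw [if_pos b3] at hq'
            by_cases b4 : q' = u ++ [c]
            · exact b2.trans b4.symm
            · rw [if_neg b4] at hq'; exact absurd hq' (by simp)
          · rw [if_neg b3] at hq'
            have h5 := hrange q' j hq'
            have h6 : t.length = j := Option.some.inj hq
            omega
        · rw [if_neg b2] at hq; exact absurd hq (by simp)
      · rw [if_neg b1] at hq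
        by_cases b3 : (u ++ [c]) <+: q'
        · rw [if_pos b3] at hq'
          by_cases b4 : q' = u ++ [c]
          · rw [if_pos b4] at hq'
            have h5 := hrange q j hq
            have h6 : t.length = j := Option.some.inj hq'
            omega
          · rw [if_neg b4] at hq'; exact absurd hq' (by simp)
        · rw [if_neg b3] at hq'; exact hinj q q' j hq hq'
    · intro q j hq
      rw [hkey] at hq
      rw [hlen]
      by_cases b1 : (u ++ [c]) <+: q
      · rw [if_pos b1] at hq
        by_cases b2 : q = u ++ [c]
        · rw [if_pos b2] at hq
          have : t.length = j := Option.some.inj hq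
          omega
        · rw [if_neg b2] at hq; exact absurd hq (by simp)
      · rw [if_neg b1] at hq
        have := hrange q j hq; omega

lemma trieInv_congr (t : List (PySem.Dict Char Nat)) (S S' : List Char → Prop)
    (h : ∀ q : List Char, q ≠ [] → (S q ↔ S' q)) (hinv : TrieInv t S) : TrieInv t S' := by
  obtain ⟨h1, h2, h3⟩ := hinv
  exact ⟨fun q hq => (h1 q hq).trans (h q hq), h2, h3⟩

lemma insert_loop (S : List Char → Prop) (p : List Char) :
    ∀ (u : List Char) (t : List (PySem.Dict Char Nat)) (ix : Nat),
    TrieInv t (fun q => S q ∨ q <+: u) → follow t 0 u = some ix →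
    TrieInv (p.foldl trieStep (t, ix)).1 (fun q => S q ∨ q <+: u ++ p) ∧
      follow (p.foldl trieStep (t, ix)).1 0 (u ++ p) = some (p.foldl trieStep (t, ix)).2 := by
  induction p with
  | nil =>
    intro u t ix hinv hu
    simpa using ⟨hinv, hu⟩
  | cons c p ih =>
    intro u t ix hinv hu
    have hstep := trieStep_inv t _ u ix c hinv hu
    have hinv' : TrieInv (trieStep (t, ix) c).1 (fun q => S q ∨ q <+: u ++ [c]) :=
      trieInv_congr _ _ _ (fun q _ => by rw [List.prefix_concat_iff]; tauto) hstep.1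
    have hres := ih (u ++ [c]) (trieStep (t, ix) c).1 (trieStep (t, ix) c).2 hinv' hstep.2
    simpa [List.append_assoc] using hres

lemma trieInv_root : TrieInv [PySem.Dict.empty] (fun _ => False) := by
  have hnil : ∀ q : List Char, q ≠ [] → follow [PySem.Dict.empty] 0 q = none := by
    intro q hq
    cases q with
    | nil => exact absurd rfl hq
    | cons c cs =>
      simp [follow, trieNode, PySem.Dict.get?_empty]
  refine ⟨?_, ?_, ?_⟩
  · intro q hq; rw [hnil q hq]; simp
  · intro q q' j hq hq'
    cases q with
    | nil =>
      cases q' with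
      | nil => rfl
      | cons c cs => rw [hnil (c :: cs) (by simp)] at hq'; cases hq'
    | cons c cs => rw [hnil (c :: cs) (by simp)] at hq; cases hq
  · intro q j hq
    cases q with
    | nil => cases hq; simp
    | cons c cs => rw [hnil (c :: cs) (by simp)] at hq; cases hq

def PrefOf (pats : List String) (q : List Char) : Prop := ∃ p ∈ pats, q <+: p.toList

lemma construct_loop (ps : List String) : ∀ (t : List (PySem.Dict Char Nat)) (S : List Char → Prop),
    TrieInv t S →
    TrieInv (ps.foldl (fun root pat => (pat.toList.foldl trieStep (root, 0)).1) t)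
      (fun q => S q ∨ ∃ p ∈ ps, q <+: p.toList) := by
  induction ps with
  | nil =>
    intro t S hinv
    exact trieInv_congr _ _ _ (fun q _ => by simp) hinv
  | cons s ps ih =>
    intro t S hinv
    have hinv0 : TrieInv t (fun q => S q ∨ q <+: ([] : List Char)) :=
      trieInv_congr _ _ _ (fun q hq => by simp [List.prefix_nil, hq]) hinv
    have hl := insert_loop S s.toList [] t 0 hinv0 rfl
    have hinv1 : TrieInv ((s.toList.foldl trieStep (t, 0)).1) (fun q => (S q ∨ q <+: s.toList)) :=
      trieInv_congr _ _ _ (fun q _ => by simp) hl.1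
    have hres := ih _ _ hinv1
    refine trieInv_congr _ _ _ (fun q _ => ?_) hres
    simp only [List.mem_cons]
    constructor
    · rintro ((h | h) | ⟨p, hp, hpre⟩)
      · exact Or.inl h
      · exact Or.inr ⟨s, Or.inl rfl, h⟩
      · exact Or.inr ⟨p, Or.inr hp, hpre⟩
    · rintro (h | ⟨p, (rfl | hp), hpre⟩)
      · exact Or.inl (Or.inl h)
      · exact Or.inl (Or.inr hpre)
      · exact Or.inr ⟨p, hp, hpre⟩

lemma construct_inv (patterns : List String) :
    TrieInv (ConstructTrie patterns) (PrefOf patterns) := by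
  have := construct_loop patterns [PySem.Dict.empty] (fun _ => False) trieInv_root
  exact trieInv_congr _ _ _ (fun q _ => by simp [PrefOf]) this

lemma get?_of_items_empty {d : PySem.Dict Char Nat} (h : d.items.isEmpty = true) (c : Char) :
    d.get? c = none := by
  simp only [List.isEmpty_iff] at h
  simp [PySem.Dict.get?, h]

lemma exists_get?_of_items_nonempty {d : PySem.Dict Char Nat} (h : d.items.isEmpty = false) :
    ∃ (c : Char) (j : Nat), d.get? c = some j := by
  rcases hd : d.items with _ | ⟨⟨k, v⟩, rest⟩
  · rw [hd] at h; simp at h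
  · refine ⟨k, v, ?_⟩
    simp [PySem.Dict.get?, hd]

lemma walk_char (t : List (PySem.Dict Char Nat)) (S : List Char → Prop)
    (h1 : ∀ q : List Char, q ≠ [] → ((follow t 0 q).isSome ↔ S q)) (s : List Char) :
    ∀ (q : List Char) (j : Nat), follow t 0 q = some j →
    (PrefixTireMatching t j s = true ↔
      ∃ r r' : List Char, s = r ++ r' ∧ r ≠ [] ∧ S (q ++ r) ∧ ∀ c', ¬ S (q ++ r ++ [c'])) := by
  induction s with
  | nil =>
    intro q j hq
    simp only [PrefixTireMatching]
    constructor
    · intro h; cases h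
    · rintro ⟨r, r', hrr, hr, -⟩
      exact absurd (List.append_eq_nil_iff.mp hrr.symm).1 hr
  | cons c cs ih =>
    intro q j hq
    simp only [PrefixTireMatching]
    cases hgd : (trieNode t j).get? c with
    | none =>
      have hnone : follow t 0 (q ++ [c]) = none := by
        rw [follow_append, hq]; simp [follow, hgd]
      simp only [Bool.false_eq_true, false_iff]
      rintro ⟨r, r', hrr, hr, hS, -⟩
      cases r with
      | nil => exact hr rfl
      | cons c₀ r₀ =>
        have hc0 : c₀ = c := by
          have := congrArg (fun l => l.head?) hrr; simpa using this.symm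
        subst hc0
        have hsome : (follow t 0 (q ++ c₀ :: r₀)).isSome := (h1 _ (by simp)).mpr hS
        have : (follow t 0 ((q ++ [c₀]) ++ r₀)).isSome := by
          simpa [List.append_assoc] using hsome
        have := follow_prefix_isSome t (q ++ [c₀]) r₀ this
        rw [hnone] at this; cases this
    | some j₂ =>
      have hq2 : follow t 0 (q ++ [c]) = some j₂ := by
        rw [follow_append, hq]; simp [follow, hgd]
      cases hleaf : (trieNode t j₂).items.isEmpty with
      | true =>
        dsimp only
        rw [if_pos hleaf]
        constructor
        · intro _
          refine ⟨[c], cs, rfl, by simp, (h1 _ (by simp)).mp (by rw [hq2]; simp), ?_⟩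
          intro c' hS'
          have := (h1 (q ++ [c] ++ [c']) (by simp)).mpr hS'
          rw [follow_append, hq2] at this
          simp [follow, get?_of_items_empty hleaf] at this
        · intro _; rfl
      | false =>
        dsimp only
        rw [if_neg (by simp [hleaf])]
        rw [ih (q ++ [c]) j₂ hq2]
        constructor
        · rintro ⟨r, r', hrr, hr, hS, hleafS⟩
          refine ⟨c :: r, r', by simp [hrr], by simp, by simpa [List.append_assoc] using hS, ?_⟩
          intro c'
          simpa [List.append_assoc] using hleafS c'
        · rintro ⟨r, r', hrr, hr, hS, hleafS⟩
          cases r with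
          | nil => exact absurd rfl hr
          | cons c₀ r₀ =>
            have hc0 : c₀ = c := by
              have := congrArg (fun l => l.head?) hrr; simpa using this.symm
            subst hc0
            cases r₀ with
            | nil =>
              exfalso
              obtain ⟨c'', j₃, hc''⟩ := exists_get?_of_items_nonempty hleaf
              apply hleafS c''
              apply (h1 _ (by simp)).mp
              rw [follow_append]
              have : follow t 0 (q ++ [c₀]) = some j₂ := hq2
              rw [this]
              simp [follow, hc'']
            | cons c₁ r₁ =>
              refine ⟨c₁ :: r₁, r', by simpa using hrr, by simp, ?_, ?_⟩
              · simpa [List.append_assoc] using hS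
              · intro c'; simpa [List.append_assoc] using hleafS c'

-- A's walk from the root reports exactly the positions where some "maximal" nonempty
-- pattern (one no other pattern strictly extends) is a prefix
lemma match_iff (patterns : List String) (s : List Char) :
    PrefixTireMatching (ConstructTrie patterns) 0 s = true ↔
      ∃ p ∈ patterns, p.toList ≠ [] ∧
        (∀ q ∈ patterns, ¬ (p.toList.length < q.toList.length ∧ p.toList <+: q.toList)) ∧
        p.toList <+: s := by
  obtain ⟨h1, -, -⟩ := construct_inv patterns
  rw [walk_char (ConstructTrie patterns) (PrefOf patterns) h1 s [] 0 rfl]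
  simp only [List.nil_append]
  constructor
  · rintro ⟨r, r', hrr, hr, ⟨p, hp, hpre⟩, hleaf⟩
    have hre : r = p.toList := by
      by_contra hne
      obtain ⟨w, hw⟩ := hpre
      cases w with
      | nil => exact hne (by simpa using hw)
      | cons c w' =>
        exact hleaf c ⟨p, hp, ⟨w', by simpa using hw⟩⟩
    refine ⟨p, hp, hre ▸ hr, ?_, ?_⟩
    · rintro q hq ⟨hlt, hpre2⟩
      obtain ⟨w, hw⟩ := hpre2
      cases w with
      | nil =>
        rw [List.append_nil] at hw
        rw [← hw] at hlt
        omega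
      | cons c w' =>
        exact hleaf c ⟨q, hq, ⟨w', by rw [hre]; simpa using hw⟩⟩
    · rw [hre] at hrr
      exact ⟨r', hrr.symm⟩
  · rintro ⟨p, hp, hne, hmax, ⟨r', hr'⟩⟩
    refine ⟨p.toList, r', hr'.symm, hne, ⟨p, hp, List.prefix_refl _⟩, ?_⟩
    rintro c' ⟨q, hq, hpre2⟩
    refine hmax q hq ⟨?_, (p.toList.prefix_append [c']).trans hpre2⟩
    have h9 := hpre2.length_le
    simp at h9 ⊢
    omega

-- membership in B's proper-prefix set is "proper prefix of some pattern"
lemma mem_properSet (patterns : List String) (w : List Char) :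
    w ∈ properSet patterns ↔ ∃ q ∈ patterns, w <+: q.toList ∧ w.length < q.toList.length := by
  unfold properSet
  rw [PySem.Set.mem_ofList]
  simp only [List.mem_flatMap, List.mem_map, List.mem_range]
  constructor
  · rintro ⟨q, hq, d, hd, rfl⟩
    exact ⟨q, hq, List.take_prefix d _, by rw [List.length_take]; omega⟩
  · rintro ⟨q, hq, hpre, hlt⟩
    exact ⟨q, hq, w.length, hlt, (List.prefix_iff_eq_take.mp hpre).symm⟩

-- membership in B's maximal set is "a nonempty pattern no pattern strictly extends"
lemma mem_maximalSet (patterns : List String) (w : List Char) :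
    w ∈ maximalSet patterns ↔ ∃ p ∈ patterns, p.toList = w ∧ w ≠ [] ∧
      ∀ q ∈ patterns, ¬ (w.length < q.toList.length ∧ w <+: q.toList) := by
  unfold maximalSet
  rw [PySem.Set.mem_ofList]
  simp only [List.mem_map, List.mem_filter, Bool.and_eq_true, Bool.not_eq_true',
    Bool.eq_false_iff]
  constructor
  · rintro ⟨p, ⟨hp, hne, hnp⟩, rfl⟩
    refine ⟨p, hp, rfl, by simpa using hne, ?_⟩
    rintro q hq ⟨hlt, hpre⟩
    exact hnp ((PySem.Set.contains_iff _ _).mpr ((mem_properSet patterns p.toList).mpr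
      ⟨q, hq, hpre, hlt⟩))
  · rintro ⟨p, hp, rfl, hne, hmax⟩
    refine ⟨p, ⟨hp, by simpa using hne, ?_⟩, rfl⟩
    intro hcont
    obtain ⟨q, hq, hpre, hlt⟩ := (mem_properSet patterns p.toList).mp
      ((PySem.Set.contains_iff _ _).mp hcont)
    exact hmax q hq ⟨hlt, hpre⟩

-- B's per-position test reports exactly "some maximal nonempty pattern is a prefix here"
lemma condB_iff (patterns : List String) (cs : List Char) (k : Nat) :
    ((lenSet patterns).any (fun d =>
        PySem.Set.contains (maximalSet patterns)
          (PySem.List.slice cs (some (k : Int)) (some ((k : Int) + d)))) = true)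
    ↔ ∃ p ∈ patterns, p.toList ≠ [] ∧
        (∀ q ∈ patterns, ¬ (p.toList.length < q.toList.length ∧ p.toList <+: q.toList)) ∧
        p.toList <+: cs.drop k := by
  rw [List.any_eq_true]
  constructor
  · rintro ⟨d, hd, hcont⟩
    obtain ⟨w0, hw0, rfl⟩ : ∃ w0 ∈ maximalSet patterns, d = (w0.length : Int) := by
      have hmem := hd
      unfold lenSet at hmem
      rw [PySem.Set.mem_ofList, List.mem_map] at hmem
      obtain ⟨w0, hw0, hval⟩ := hmem
      exact ⟨w0, hw0, hval.symm⟩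
    have hb : (k : Int) + (w0.length : Int) = ((k + w0.length : Nat) : Int) := by push_cast; ring
    rw [hb, PySem.Set.contains_iff, PySem.List.slice_natCast, Nat.add_sub_cancel_left] at hcont
    obtain ⟨p, hp, hpw, hne, hmax⟩ := (mem_maximalSet patterns _).mp hcont
    refine ⟨p, hp, ?_, ?_, ?_⟩
    · rw [hpw]; exact hne
    · rw [hpw]; exact hmax
    · rw [hpw]; exact List.take_prefix _ _
  · rintro ⟨p, hp, hne, hmax, hpre⟩
    have hmem : p.toList ∈ maximalSet patterns :=
      (mem_maximalSet patterns p.toList).mpr ⟨p, hp, rfl, hne, hmax⟩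
    refine ⟨(p.toList.length : Int), ?_, ?_⟩
    · unfold lenSet
      rw [PySem.Set.mem_ofList, List.mem_map]
      exact ⟨p.toList, hmem, rfl⟩
    · have hb : (k : Int) + (p.toList.length : Int) = ((k + p.toList.length : Nat) : Int) := by
        push_cast; ring
      rw [hb, PySem.Set.contains_iff, PySem.List.slice_natCast, Nat.add_sub_cancel_left]
      rw [← List.prefix_iff_eq_take.mp hpre]
      exact hmem

-- per-position agreement of the two Bool tests
lemma cond_eq (patterns : List String) (cs : List Char) (k : Nat) :
    PrefixTireMatching (ConstructTrie patterns) 0 (cs.drop k) =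
      (lenSet patterns).any (fun d =>
        PySem.Set.contains (maximalSet patterns)
          (PySem.List.slice cs (some (k : Int)) (some ((k : Int) + d)))) := by
  apply Bool.coe_iff_coe.mp
  rw [match_iff, condB_iff]

-- ===== VERDICT (by name: the statement is the Claim_ definition above) =====
theorem solve_spec : Claim_equal_solve := by
  intro text n patterns _
  show solve text n patterns = solve_alt text n patterns
  unfold solve solve_alt
  dsimp only
  rw [PySem.List.foldl_append_if
    (fun k => PrefixTireMatching (ConstructTrie patterns) 0 (text.toList.drop k))
    (fun k => (k : Int))]
  rw [List.nil_append]
  exact congrArg (List.map (fun k : Nat => (k : Int)))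
    (List.filter_congr (fun k _ => cond_eq patterns text.toList k))
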